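-- pv_equiv track=rewrite | github.com/mseaborn/x86-decoder | constraint_gen.py | CatBits
-- ===== SOURCE A (Python) =====
-- def CatBits(values, sizes_in_bits):
--   result = 0
--   for value, size_in_bits in zip(values, sizes_in_bits):
--     assert isinstance(value, int)
--     assert 0 <= value
--     assert value < (1 << size_in_bits)
--     result = (result << size_in_bits) | value
--   return result
-- ===== SOURCE B (Python) =====
-- def CatBits(values, sizes_in_bits):
--   result = 0
--   offset = 0
--   for value, size_in_bits in reversed(list(zip(values, sizes_in_bits))):
--     result += value << offset
--     offset += size_in_bits
--   return result
-- ===== Notes on version B (the rewrite author's own statement) =====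
-- stated objective: alternative
-- what changed: B walks the zipped (value,size) pairs right-to-left, placing each value at its absolute bit offset with result += value << offset (offset accumulated), instead of A's left-to-right loop that repeatedly shifts the whole accumulator and ORs the next value in.
import Mathlib
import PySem

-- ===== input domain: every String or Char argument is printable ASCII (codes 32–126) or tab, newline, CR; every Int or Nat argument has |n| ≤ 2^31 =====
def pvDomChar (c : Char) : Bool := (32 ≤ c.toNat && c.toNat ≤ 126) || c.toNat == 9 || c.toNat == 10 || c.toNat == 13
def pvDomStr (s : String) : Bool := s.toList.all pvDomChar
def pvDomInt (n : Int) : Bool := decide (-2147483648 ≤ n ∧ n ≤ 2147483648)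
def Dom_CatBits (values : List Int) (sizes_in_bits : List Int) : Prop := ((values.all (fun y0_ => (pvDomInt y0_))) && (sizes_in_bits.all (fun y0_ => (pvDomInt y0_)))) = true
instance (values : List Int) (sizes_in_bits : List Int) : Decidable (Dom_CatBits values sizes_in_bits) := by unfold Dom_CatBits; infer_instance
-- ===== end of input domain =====

-- B changes the decomposition: it folds the zipped pairs right-to-left, adding each value
-- shifted to its absolute bit offset, instead of A's repeated shift-and-OR of the accumulator.

-- ===== PORT A =====
-- Python `x << n`: exact for n ≥ 0 (Pre_ excludes negative shift counts, where Python raises ValueError)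
def pyShl (x n : Int) : Int := x * 2 ^ n.toNat
-- Python `x | y` on ints is two's-complement bitwise or = Int.lor (exact)
def CatBits (values : List Int) (sizes_in_bits : List Int) : Int :=
  (values.zip sizes_in_bits).foldl
    (fun result p => Int.lor (pyShl result p.2) p.1) 0

-- ===== PORT B =====
def CatBits_alt (values : List Int) (sizes_in_bits : List Int) : Int :=
  ((values.zip sizes_in_bits).reverse.foldl
    (fun st p => (st.1 + pyShl p.1 st.2, st.2 + p.2)) ((0 : Int), (0 : Int))).1

-- ===== PRECONDITION & SPEC =====
-- Pre_ holds exactly when every zipped (value, size) pair passes A's asserts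
-- (0 ≤ value < 2^size; size ≥ 0, since Python's `1 << size` raises for negative size).
def Pre_CatBits (values : List Int) (sizes_in_bits : List Int) : Prop :=
  ∀ p ∈ values.zip sizes_in_bits, 0 ≤ p.2 ∧ 0 ≤ p.1 ∧ p.1 < 2 ^ p.2.toNat
instance (values : List Int) (sizes_in_bits : List Int) : Decidable (Pre_CatBits values sizes_in_bits) := by unfold Pre_CatBits; infer_instance
def pvWitness_CatBits : List Int × List Int := ([3, 1], [2, 1])
def Spec_CatBits (values : List Int) (sizes_in_bits : List Int) (out : Int) : Prop := out = CatBits_alt values sizes_in_bits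
instance (values : List Int) (sizes_in_bits : List Int) (out : Int) : Decidable (Spec_CatBits values sizes_in_bits out) := by unfold Spec_CatBits; infer_instance

-- ===== CLAIM (what is proved, stated in full; the proofs are below) =====
def Claim_equal_CatBits : Prop := ∀ (values : List Int) (sizes_in_bits : List Int), Dom_CatBits values sizes_in_bits → Pre_CatBits values sizes_in_bits → Spec_CatBits values sizes_in_bits (CatBits values sizes_in_bits)

-- ===== LEMMAS AND PROOFS =====

-- a pair passes A's asserts
def pvOk (p : Int × Int) : Prop := 0 ≤ p.2 ∧ 0 ≤ p.1 ∧ p.1 < 2 ^ p.2.toNat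

-- total bit width of a pair list
def pvSz : List (Int × Int) → Nat
  | [] => 0
  | p :: t => p.2.toNat + pvSz t

-- the concatenated value, defined structurally
def pvV : List (Int × Int) → Int
  | [] => 0
  | p :: t => p.1 * 2 ^ pvSz t + pvV t

theorem shl_or_add (s : Nat) : ∀ a b : Nat, b < 2^s → (a <<< s) ||| b = a * 2^s + b := by
  induction s with
  | zero => intro a b h; interval_cases b; simp [Nat.shiftLeft_eq]
  | succ s ih =>
    intro a b h
    have hb : b / 2 < 2^s := by omega
    have hm : b % 2 = 0 ∨ b % 2 = 1 := by omega
    have h2 : b = Nat.bit (b.testBit 0) (b / 2) := by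
      simp only [Nat.bit, Nat.testBit_zero]
      rcases hm with hm | hm <;> simp [hm] <;> omega
    have h1 : a <<< (s+1) = Nat.bit false (a <<< s) := by
      simp [Nat.shiftLeft_eq, Nat.bit, Nat.pow_succ]; ring
    rw [h1]
    conv_lhs => rw [h2]
    rw [Nat.lor_bit, ih a (b/2) hb]
    simp only [Nat.bit, Nat.testBit_zero, Bool.false_or, Nat.pow_succ]
    rcases hm with hm | hm <;> simp [hm] <;> ring_nf <;> omega

theorem int_lor_add (r v : Int) (s : Nat) (hr : 0 ≤ r) (hv : 0 ≤ v) (h : v < 2^s) :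
    Int.lor (r * 2^s) v = r * 2^s + v := by
  lift r to Nat using hr
  lift v to Nat using hv
  have h' : v < 2^s := by exact_mod_cast h
  have key := shl_or_add s r v h'
  rw [Nat.shiftLeft_eq] at key
  have hcast : Int.lor ((r * 2^s : Nat) : Int) ((v : Nat) : Int) = (((r * 2^s ||| v : Nat)) : Int) := by
    exact_mod_cast rfl
  push_cast at hcast ⊢
  rw [hcast]
  exact_mod_cast congrArg (Nat.cast : Nat → Int) key

theorem catA_char : ∀ (l : List (Int × Int)) (r : Int), (∀ p ∈ l, pvOk p) → 0 ≤ r →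
    l.foldl (fun result p => Int.lor (pyShl result p.2) p.1) r
      = r * 2 ^ pvSz l + pvV l := by
  intro l
  induction l with
  | nil => intro r _ _; simp [pvSz, pvV]
  | cons p t ih =>
    intro r h hr
    obtain ⟨hs, hv, hlt⟩ := h p (List.mem_cons_self ..)
    have hstep : Int.lor (pyShl r p.2) p.1 = r * 2 ^ p.2.toNat + p.1 :=
      int_lor_add r p.1 p.2.toNat hr hv hlt
    have hr' : 0 ≤ r * 2 ^ p.2.toNat + p.1 := by positivity
    simp only [List.foldl_cons, hstep, pvSz, pvV,
      ih _ (fun q hq => h q (List.mem_cons_of_mem _ hq)) hr']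
    rw [pow_add]; ring

theorem catB_char : ∀ (l : List (Int × Int)), (∀ p ∈ l, pvOk p) →
    l.foldr (fun p st => (st.1 + pyShl p.1 st.2, st.2 + p.2)) ((0 : Int), (0 : Int))
      = (pvV l, (pvSz l : Int)) := by
  intro l
  induction l with
  | nil => simp [pvV, pvSz]
  | cons p t ih =>
    intro h
    obtain ⟨hs, _, _⟩ := h p (List.mem_cons_self ..)
    simp only [List.foldr_cons, ih (fun q hq => h q (List.mem_cons_of_mem _ hq))]
    simp only [pyShl, pvV, pvSz, Prod.mk.injEq]
    constructor
    · simp [Int.toNat_natCast]; ring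
    · push_cast; omega

-- ===== VERDICT (by name: the statement is the Claim_ definition above) =====
theorem CatBits_spec : Claim_equal_CatBits := by
  intro values sizes_in_bits _ hpre
  unfold Spec_CatBits CatBits CatBits_alt
  rw [List.foldl_reverse, catB_char _ hpre, catA_char _ 0 hpre le_rfl]
  simp
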